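-- pv_equiv track=rewrite | github.com/bambangbc/HRIS-YT---ODOO-10 | bgt_payroll/wizard/slip_report.py | _convert_nn
-- ===== SOURCE A (Python) =====
-- dic = {
--     'to_19' : ('Zero', 'One', 'Two', 'Three', 'Four', 'Five', 'Six', 'Seven', 'Eight', 'Nine', 'Ten', 'Eleven', 'Twelve', 'Thirteen', 'Fourteen', 'Fifteen', 'Sixteen', 'Seventeen', 'Eighteen', 'Nineteen'),
--     'tens'  : ('Twenty', 'Thirty', 'Forty', 'Fifty', 'Sixty', 'Seventy', 'Eighty', 'Ninety'),
--     'denom' : ('', 'Thousand', 'Million', 'Billion', 'Trillion', 'Quadrillion', 'Quintillion'),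
--     'to_19_id' : ('NOL', 'SATU', 'DUA', 'TIGA', 'EMPAT', 'LIMA', 'ENAM', 'TUJUH', 'DELAPAN', 'SEMBILAN', 'SEPULUH', 'SEBELAS', 'DUA BELAS', 'TIGA BELAS', 'EMPAT BELAS', 'LIMA BELAS', 'ENAM BELAS', 'TUJUH BELAS', 'DELAPAN BELAS', 'SEMBILAN BELAS'),
--     'tens_id'  : ('DUA PULUH', 'TIGA PULUH', 'EMPAT PULUH', 'LIMA PULUH', 'ENAM PULUH', 'TUJUH PULUH', 'DELAPAN PULUH', 'SEMBILAN PULUH'),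
--     'denom_id' : ('', 'RIBU', 'JUTA', 'MILIAR', 'TRILIUN', 'BILIUN')
-- }
--
-- def _convert_nn(val, bhs):
--     tens = dic['tens_id']
--     to_19 = dic['to_19_id']
--     if bhs == 'en':
--         tens = dic['tens']
--         to_19 = dic['to_19']
--     if val < 20:
--         return to_19[val]
--     for (dcap, dval) in ((k, 20 + (10 * v)) for (v, k) in enumerate(tens)):
--         if dval + 10 > val:
--             if val % 10:
--                 return dcap + ' ' + to_19[val % 10]
--             return dcap
-- ===== SOURCE B (Python) =====
-- dic = {
--     'to_19' : ('Zero', 'One', 'Two', 'Three', 'Four', 'Five', 'Six', 'Seven', 'Eight', 'Nine', 'Ten', 'Eleven', 'Twelve', 'Thirteen', 'Fourteen', 'Fifteen', 'Sixteen', 'Seventeen', 'Eighteen', 'Nineteen'),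
--     'tens'  : ('Twenty', 'Thirty', 'Forty', 'Fifty', 'Sixty', 'Seventy', 'Eighty', 'Ninety'),
--     'denom' : ('', 'Thousand', 'Million', 'Billion', 'Trillion', 'Quadrillion', 'Quintillion'),
--     'to_19_id' : ('NOL', 'SATU', 'DUA', 'TIGA', 'EMPAT', 'LIMA', 'ENAM', 'TUJUH', 'DELAPAN', 'SEMBILAN', 'SEPULUH', 'SEBELAS', 'DUA BELAS', 'TIGA BELAS', 'EMPAT BELAS', 'LIMA BELAS', 'ENAM BELAS', 'TUJUH BELAS', 'DELAPAN BELAS', 'SEMBILAN BELAS'),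
--     'tens_id'  : ('DUA PULUH', 'TIGA PULUH', 'EMPAT PULUH', 'LIMA PULUH', 'ENAM PULUH', 'TUJUH PULUH', 'DELAPAN PULUH', 'SEMBILAN PULUH'),
--     'denom_id' : ('', 'RIBU', 'JUTA', 'MILIAR', 'TRILIUN', 'BILIUN')
-- }
--
-- def _convert_nn(val, bhs):
--     tens = dic['tens_id' if bhs != 'en' else 'tens']
--     to_19 = dic['to_19_id' if bhs != 'en' else 'to_19']
--     if val < 20:
--         return to_19[val]
--     word = tens[val // 10 - 2]
--     r = val % 10
--     return word + ' ' + to_19[r] if r else word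
-- ===== Notes on version B (the rewrite author's own statement) =====
-- stated objective: simpler
-- what changed: Replaces the scanning generator/loop over enumerated decade words with direct arithmetic indexing tens[val//10-2] plus an optional units word for val%10.
-- outside the precondition, e.g. on _convert_nn(100, 'en'): A returns None, B raises IndexError; on _convert_nn(-21, 'id'): A raises IndexError, B raises IndexError
import Mathlib
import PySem

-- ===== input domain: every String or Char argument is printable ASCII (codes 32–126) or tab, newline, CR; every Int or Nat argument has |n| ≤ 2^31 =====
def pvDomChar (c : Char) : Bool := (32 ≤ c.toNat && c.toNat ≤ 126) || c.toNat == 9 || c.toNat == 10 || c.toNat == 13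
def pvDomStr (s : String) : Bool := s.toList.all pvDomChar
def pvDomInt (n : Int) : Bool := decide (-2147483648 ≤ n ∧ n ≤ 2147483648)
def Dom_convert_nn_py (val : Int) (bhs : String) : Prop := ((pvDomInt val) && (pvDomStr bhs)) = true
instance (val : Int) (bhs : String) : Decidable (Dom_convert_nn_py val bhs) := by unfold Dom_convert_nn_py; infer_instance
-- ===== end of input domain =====

-- B replaces A's scan over enumerated decade words with direct arithmetic indexing (simpler); return values agree on -20 ≤ val < 100.

-- ===== PORT A =====
def pvTo19En : List String := ["Zero", "One", "Two", "Three", "Four", "Five", "Six", "Seven", "Eight", "Nine", "Ten", "Eleven", "Twelve", "Thirteen", "Fourteen", "Fifteen", "Sixteen", "Seventeen", "Eighteen", "Nineteen"]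
def pvTensEn : List String := ["Twenty", "Thirty", "Forty", "Fifty", "Sixty", "Seventy", "Eighty", "Ninety"]
def pvTo19Id : List String := ["NOL", "SATU", "DUA", "TIGA", "EMPAT", "LIMA", "ENAM", "TUJUH", "DELAPAN", "SEMBILAN", "SEPULUH", "SEBELAS", "DUA BELAS", "TIGA BELAS", "EMPAT BELAS", "LIMA BELAS", "ENAM BELAS", "TUJUH BELAS", "DELAPAN BELAS", "SEMBILAN BELAS"]
def pvTensId : List String := ["DUA PULUH", "TIGA PULUH", "EMPAT PULUH", "LIMA PULUH", "ENAM PULUH", "TUJUH PULUH", "DELAPAN PULUH", "SEMBILAN PULUH"]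

-- the for-loop over ((k, 20 + 10*v) for (v, k) in enumerate(tens)); [] = loop falls off (Python returns None, outside Pre_)
def pvAScan (val : Int) (to19 : List String) : List (Int × String) → String
  | [] => ""
  | (v, dcap) :: rest =>
      let dval : Int := 20 + 10 * v
      if dval + 10 > val then
        if PySem.Int.mod val 10 ≠ 0 then
          dcap ++ " " ++ (PySem.List.pyGet? to19 (PySem.Int.mod val 10)).getD ""
        else dcap
      else pvAScan val to19 rest

def pvACore (tens to19 : List String) (val : Int) : String :=
  if val < 20 then (PySem.List.pyGet? to19 val).getD ""   -- to_19[val]; none (IndexError) only outside Pre_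
  else pvAScan val to19 (PySem.List.enumerate tens)

def convert_nn_py (val : Int) (bhs : String) : String :=
  pvACore (if bhs == "en" then pvTensEn else pvTensId)
          (if bhs == "en" then pvTo19En else pvTo19Id) val

-- ===== PORT B =====
def pvBCore (tens to19 : List String) (val : Int) : String :=
  if val < 20 then (PySem.List.pyGet? to19 val).getD ""
  else
    let word := (PySem.List.pyGet? tens (PySem.Int.floordiv val 10 - 2)).getD ""  -- none (IndexError) only outside Pre_
    let r := PySem.Int.mod val 10
    if r ≠ 0 then word ++ " " ++ (PySem.List.pyGet? to19 r).getD "" else word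

def convert_nn_py_alt (val : Int) (bhs : String) : String :=
  pvBCore (if bhs == "en" then pvTensEn else pvTensId)
          (if bhs == "en" then pvTo19En else pvTo19Id) val

-- ===== PRECONDITION & SPEC =====
-- Pre_ excludes val ≥ 100, where A's loop falls off and returns None (not a string, B raises IndexError),
-- and val < -20, where A raises IndexError.
def Pre_convert_nn_py (val : Int) (bhs : String) : Prop := -20 ≤ val ∧ val < 100
instance (val : Int) (bhs : String) : Decidable (Pre_convert_nn_py val bhs) := by unfold Pre_convert_nn_py; infer_instance
def pvWitness_convert_nn_py : Int × String := (21, "en")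

def Spec_convert_nn_py (val : Int) (bhs : String) (out : String) : Prop := out = convert_nn_py_alt val bhs
instance (val : Int) (bhs : String) (out : String) : Decidable (Spec_convert_nn_py val bhs out) := by unfold Spec_convert_nn_py; infer_instance

-- ===== CLAIM (what is proved, stated in full; the proofs are below) =====
def Claim_equal_convert_nn_py : Prop := ∀ (val : Int) (bhs : String), Dom_convert_nn_py val bhs → Pre_convert_nn_py val bhs → Spec_convert_nn_py val bhs (convert_nn_py val bhs)

-- ===== LEMMAS AND PROOFS =====
theorem pvKeyEn : ∀ n : Fin 120, pvACore pvTensEn pvTo19En ((n.val : Int) - 20) = pvBCore pvTensEn pvTo19En ((n.val : Int) - 20) := by decide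

theorem pvKeyId : ∀ n : Fin 120, pvACore pvTensId pvTo19Id ((n.val : Int) - 20) = pvBCore pvTensId pvTo19Id ((n.val : Int) - 20) := by decide

-- ===== VERDICT (by name: the statement is the Claim_ definition above) =====
theorem convert_nn_py_spec : Claim_equal_convert_nn_py := by
  intro val bhs _ hpre
  obtain ⟨h1, h2⟩ := hpre
  unfold Spec_convert_nn_py convert_nn_py convert_nn_py_alt
  have hn : (val + 20).toNat < 120 := by omega
  have hv : (((⟨(val + 20).toNat, hn⟩ : Fin 120).val : Int) - 20) = val := by
    simp only []
    omega
  cases h : bhs == "en" <;> simp only [if_pos, if_neg, Bool.false_eq_true, not_false_iff]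
  · rw [← hv]; exact pvKeyId ⟨(val + 20).toNat, hn⟩
  · rw [← hv]; exact pvKeyEn ⟨(val + 20).toNat, hn⟩
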